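-- pv_equiv track=rewrite | github.com/ccpnmr/analysis | src/python/ccpn/ui/gui/widgets/DrawSS.py | createBlocksFromSequence
-- ===== SOURCE A (Python) =====
-- DSSP_definitions = {
--            'H': 'H', # 3-turn helix (310 helix). Min length 3 residues.
--            'G': 'H', # 4-turn helix (α helix). Minimum length 4 residues.
--            'I': 'H',  #  5-turn helix (π helix). Minimum length 5 residues.
--            'B': 'E', # extended strand in parallel and/or anti-parallel β-sheet conformation. Min length 2 residues.
--            'E': 'E', # residue in isolated β-bridge (single pair β-sheet hydrogen bond formation)
--            'T': 'T', # hydrogen bonded turn (3, 4 or 5 turn)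
--            'S': 'T', #  coil (residues which are not in any of the above conformations).
--             'C':'C', # DSSP_definitions, only a blank placeholder to join blocks,
--             }
--
-- def createBlocksFromSequence(ss_sequence):
--     ss_blocks = []  # (type, start, end)
--     prev_ss = None
--     for idx, elem in enumerate(ss_sequence):
--         reduced_elem = DSSP_definitions.get(elem, 'C')
--         if reduced_elem != prev_ss:
--             ss_blocks.append([reduced_elem, idx, idx])
--             prev_ss = reduced_elem
--         ss_blocks[-1][-1] = idx
--     return ss_blocks
-- ===== SOURCE B (Python) =====
-- DSSP_definitions = {
--            'H': 'H',
--            'G': 'H',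
--            'I': 'H',
--            'B': 'E',
--            'E': 'E',
--            'T': 'T',
--            'S': 'T',
--            'C': 'C',
--            }
--
-- def createBlocksFromSequence(ss_sequence):
--     # map to reduced types first, then emit one triple per contiguous run
--     reduced = [DSSP_definitions.get(e, 'C') for e in ss_sequence]
--     blocks = []
--     idx = 0
--     while reduced:
--         x = reduced[0]
--         k = 1
--         while k < len(reduced) and reduced[k] == x:
--             k += 1
--         blocks.append([x, idx, idx + k - 1])
--         reduced = reduced[k:]
--         idx += k
--     return blocks
-- ===== Notes on version B (the rewrite author's own statement) =====
-- stated objective: idiomatic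
-- what changed: B first maps the whole sequence to reduced DSSP types, then emits one [type,start,end] triple per contiguous run by scanning run lengths, replacing A's prev_ss state machine that appends a block and rewrites the last block's end index on every element.
import Mathlib
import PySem

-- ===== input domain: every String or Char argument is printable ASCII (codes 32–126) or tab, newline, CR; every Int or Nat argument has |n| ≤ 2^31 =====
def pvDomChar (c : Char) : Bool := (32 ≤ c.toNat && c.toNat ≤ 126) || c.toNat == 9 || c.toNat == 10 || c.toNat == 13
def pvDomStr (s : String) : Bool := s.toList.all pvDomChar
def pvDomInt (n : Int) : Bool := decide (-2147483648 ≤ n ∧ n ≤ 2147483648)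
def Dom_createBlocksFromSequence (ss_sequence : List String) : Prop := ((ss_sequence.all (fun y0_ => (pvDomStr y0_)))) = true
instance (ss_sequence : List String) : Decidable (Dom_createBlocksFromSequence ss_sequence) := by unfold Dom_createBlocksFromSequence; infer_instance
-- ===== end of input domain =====

-- B groups the reduced sequence into contiguous runs and emits one triple per run,
-- instead of A's prev_ss state machine that rewrites the last block's end on every element (idiomatic).

-- ===== PORT A =====
-- module-level DSSP_definitions dict
def dsspDefinitions : PySem.Dict String String :=
  PySem.Dict.ofList [("H", "H"), ("G", "H"), ("I", "H"), ("B", "E"), ("E", "E"),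
                     ("T", "T"), ("S", "T"), ("C", "C")]

-- ss_blocks[-1][-1] = idx  (set the end field of the last block)
def setLastEnd (bs : List (String × Int × Int)) (i : Int) : List (String × Int × Int) :=
  match bs with
  | [] => []
  | [b] => [(b.1, b.2.1, i)]
  | b :: rest => b :: setLastEnd rest i

-- the 'for idx, elem in enumerate(ss_sequence)' loop, state = (ss_blocks, prev_ss)
def aLoop (xs : List String) (idx : Int) (blocks : List (String × Int × Int))
    (prev : Option String) : List (String × Int × Int) :=
  match xs with
  | [] => blocks
  | elem :: rest =>
    let reduced := dsspDefinitions.getD elem "C"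
    let st := if some reduced ≠ prev then (blocks ++ [(reduced, idx, idx)], some reduced)
              else (blocks, prev)
    aLoop rest (idx + 1) (setLastEnd st.1 idx) st.2

def createBlocksFromSequence (ss_sequence : List String) : List (String × Int × Int) :=
  aLoop ss_sequence 0 [] none

-- ===== PORT B =====
-- emit one triple per contiguous run: peel the leading run, recurse on the rest
def bRuns (rs : List String) (idx : Int) : List (String × Int × Int) :=
  match rs with
  | [] => []
  | x :: xs =>
    let k : Int := 1 + (xs.takeWhile (· == x)).length
    (x, idx, idx + k - 1) :: bRuns (xs.dropWhile (· == x)) (idx + k)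
termination_by rs.length
decreasing_by
  have := List.length_dropWhile_le (p := (· == x)) (l := xs)
  simp; omega

def createBlocksFromSequence_alt (ss_sequence : List String) : List (String × Int × Int) :=
  bRuns (ss_sequence.map (fun e => dsspDefinitions.getD e "C")) 0

-- ===== PRECONDITION & SPEC =====
def Spec_createBlocksFromSequence (ss_sequence : List String) (out : List (String × Int × Int)) : Prop := out = createBlocksFromSequence_alt ss_sequence
instance (ss_sequence : List String) (out : List (String × Int × Int)) : Decidable (Spec_createBlocksFromSequence ss_sequence out) := by unfold Spec_createBlocksFromSequence; infer_instance

-- ===== CLAIM (what is proved, stated in full; the proofs are below) =====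
def Claim_equal_createBlocksFromSequence : Prop := ∀ (ss_sequence : List String), Dom_createBlocksFromSequence ss_sequence → Spec_createBlocksFromSequence ss_sequence (createBlocksFromSequence ss_sequence)

-- ===== LEMMAS AND PROOFS =====

-- A's loop over the original strings only depends on the reduced values: re-express it on the reduced list
def aLoopR (rs : List String) (idx : Int) (blocks : List (String × Int × Int))
    (prev : Option String) : List (String × Int × Int) :=
  match rs with
  | [] => blocks
  | r :: rest =>
    let st := if some r ≠ prev then (blocks ++ [(r, idx, idx)], some r) else (blocks, prev)
    aLoopR rest (idx + 1) (setLastEnd st.1 idx) st.2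

theorem aLoop_eq_aLoopR (xs : List String) (idx : Int) (blocks : List (String × Int × Int))
    (prev : Option String) :
    aLoop xs idx blocks prev
      = aLoopR (xs.map (fun e => dsspDefinitions.getD e "C")) idx blocks prev := by
  induction xs generalizing idx blocks prev with
  | nil => simp [aLoop, aLoopR]
  | cons e rest ih => simp [aLoop, aLoopR, ih]

theorem setLastEnd_append (bs : List (String × Int × Int)) (a : String) (b c i : Int) :
    setLastEnd (bs ++ [(a, b, c)]) i = bs ++ [(a, b, i)] := by
  induction bs with
  | nil => rfl
  | cons x xs ih =>
    cases xs with
    | nil => rfl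
    | cons y ys => simp only [List.cons_append, setLastEnd] at ih ⊢; rw [ih]

-- the in-progress block (p, s, idx-1): either the next element extends it or a new block starts
def runsFrom (p : String) (s idx : Int) (rs : List String) : List (String × Int × Int) :=
  match rs with
  | [] => [(p, s, idx - 1)]
  | r :: rest =>
    if r = p then runsFrom p s (idx + 1) rest
    else (p, s, idx - 1) :: runsFrom r idx (idx + 1) rest

theorem aLoopR_runsFrom (rs : List String) (blocks : List (String × Int × Int))
    (p : String) (s idx : Int) :
    aLoopR rs idx (blocks ++ [(p, s, idx - 1)]) (some p) = blocks ++ runsFrom p s idx rs := by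
  induction rs generalizing blocks p s idx with
  | nil => simp [aLoopR, runsFrom]
  | cons r rest ih =>
    by_cases h : r = p
    · subst h
      simp only [aLoopR, runsFrom, ne_eq, not_true_eq_false, not_false_eq_true, if_neg, ite_true]
      rw [setLastEnd_append]
      have h1 := ih blocks r s (idx + 1)
      simp only [add_sub_cancel_right] at h1
      exact h1
    · have hne : some r ≠ some p := by simpa using h
      simp only [aLoopR, runsFrom, if_pos hne, if_neg h]
      rw [setLastEnd_append]
      have h1 := ih (blocks ++ [(p, s, idx - 1)]) r idx (idx + 1)
      simp only [add_sub_cancel_right] at h1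
      rw [h1]
      simp

theorem runsFrom_eq_bRuns (rest : List String) (p : String) (s idx : Int) :
    runsFrom p s idx rest
      = (p, s, idx + ((rest.takeWhile (· == p)).length : Int) - 1)
          :: bRuns (rest.dropWhile (· == p)) (idx + ((rest.takeWhile (· == p)).length : Int)) := by
  induction rest generalizing p s idx with
  | nil => simp [runsFrom, bRuns]
  | cons r rest ih =>
    by_cases h : r = p
    · subst h
      rw [runsFrom, if_pos rfl, ih]
      simp only [List.takeWhile_cons, List.dropWhile_cons, BEq.rfl, ite_true, List.length_cons]
      simp only [List.cons.injEq, Prod.mk.injEq, true_and]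
      refine ⟨by push_cast; ring, ?_⟩
      congr 1
      push_cast; ring
    · have hb : (r == p) = false := by simpa using h
      rw [runsFrom, if_neg h, ih]
      simp only [List.takeWhile_cons, List.dropWhile_cons, hb, Bool.false_eq_true, ite_false,
        List.length_nil, Nat.cast_zero, add_zero]
      simp only [List.cons.injEq, true_and]
      simp only [bRuns]
      simp only [List.cons.injEq, Prod.mk.injEq, true_and]
      refine ⟨by ring, ?_⟩
      congr 1
      ring

theorem aLoopR_eq_bRuns (rs : List String) : aLoopR rs 0 [] none = bRuns rs 0 := by
  cases rs with
  | nil => simp [aLoopR, bRuns]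
  | cons r rest =>
    simp only [aLoopR, ne_eq, reduceCtorEq, not_false_eq_true, if_pos, List.nil_append]
    have h0 : setLastEnd [(r, (0 : Int), (0 : Int))] 0 = [] ++ [(r, 0, (0 + 1 : Int) - 1)] := by
      simp [setLastEnd]
    rw [h0]
    have h1 := aLoopR_runsFrom rest [] r 0 (0 + 1)
    rw [h1, runsFrom_eq_bRuns, List.nil_append]
    simp only [bRuns]
    simp only [List.cons.injEq, Prod.mk.injEq, true_and]
    refine ⟨by push_cast; ring, ?_⟩
    congr 1
    push_cast; ring

-- ===== VERDICT (by name: the statement is the Claim_ definition above) =====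
theorem createBlocksFromSequence_spec : Claim_equal_createBlocksFromSequence := by
  intro ss _
  unfold Spec_createBlocksFromSequence createBlocksFromSequence createBlocksFromSequence_alt
  rw [aLoop_eq_aLoopR, aLoopR_eq_bRuns]
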